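-- pv_equiv track=rewrite | github.com/it-like/leetcode | difficulties/easy.py | find_violation
-- ===== SOURCE A (Python) =====
-- def find_violation(nums):
--     violations = 0
--     left = nums[0]
--     for right in range(1,len(nums)):
--         if left > nums[right]:
--             violations += 1
--         left = nums[right]
--     if violations == 0 or (violations == 1 and nums[-1] <= nums[0]):
--         return True
--     else:
--         return False
-- ===== SOURCE B (Python) =====
-- def find_violation(nums):
--     first = nums[0]
--     pairs = list(zip(nums, nums[1:]))
--     for k, (a, b) in enumerate(pairs):
--         if a > b:
--             return all(x <= y for x, y in pairs[k + 1:]) and nums[-1] <= first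
--     return True
-- ===== Notes on version B (the rewrite author's own statement) =====
-- stated objective: alternative
-- what changed: B replaces A's full counting pass plus compound condition with an early-exit staged check: scan for the FIRST descent, and on finding it verify that the remaining suffix is non-decreasing and that the last element wraps to the first; no descent counter is kept.
import Mathlib
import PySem

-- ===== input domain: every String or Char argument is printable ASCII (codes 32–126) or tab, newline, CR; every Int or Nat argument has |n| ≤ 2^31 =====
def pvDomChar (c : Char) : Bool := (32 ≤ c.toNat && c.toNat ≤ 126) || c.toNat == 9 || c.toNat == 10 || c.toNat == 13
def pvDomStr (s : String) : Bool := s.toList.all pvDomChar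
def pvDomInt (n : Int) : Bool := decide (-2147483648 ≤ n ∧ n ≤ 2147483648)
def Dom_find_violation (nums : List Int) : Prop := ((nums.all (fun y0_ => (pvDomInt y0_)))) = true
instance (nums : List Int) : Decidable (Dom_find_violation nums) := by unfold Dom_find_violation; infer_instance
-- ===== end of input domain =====

-- B replaces A's full descent count plus compound wrap condition with an early-exit staged check
-- (find the first descent, then verify the suffix is sorted and the wrap); same O(n) cost.
-- ===== PORT A =====
def find_violation (nums : List Int) : Bool :=
  let violations : Int := 0
  let left : Int := PySem.List.pyGetD nums 0 0
  let st := (PySem.List.pyRange 1 (nums.length : Int) 1).foldl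
      (fun (s : Int × Int) right =>
        let v := if s.2 > PySem.List.pyGetD nums right 0 then s.1 + 1 else s.1
        (v, PySem.List.pyGetD nums right 0))
      (violations, left)
  if st.1 = 0 ∨ (st.1 = 1 ∧ PySem.List.pyGetD nums (-1) 0 ≤ PySem.List.pyGetD nums 0 0) then true
  else false

-- ===== PORT B =====
/-- `all(x <= y for x, y in rest)` -/
def sortedPairs : List (Int × Int) → Bool
  | [] => true
  | (a, b) :: t => decide (a ≤ b) && sortedPairs t

/-- the `for k, (a, b) in enumerate(pairs)` loop with its early return -/
def scanB (first last : Int) : List (Int × Int) → Bool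
  | [] => true
  | (a, b) :: t => if a > b then sortedPairs t && decide (last ≤ first) else scanB first last t

def find_violation_alt (nums : List Int) : Bool :=
  let first := PySem.List.pyGetD nums 0 0
  let pairs := nums.zip nums.tail
  scanB first (PySem.List.pyGetD nums (-1) 0) pairs

-- ===== PRECONDITION & SPEC =====
-- Pre_ excludes only the empty list, on which BOTH programs raise IndexError reading the first element.
def Pre_find_violation (nums : List Int) : Prop := nums ≠ []
instance (nums : List Int) : Decidable (Pre_find_violation nums) := by unfold Pre_find_violation; infer_instance
def pvWitness_find_violation : List Int := [1, 3, 2]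

def Spec_find_violation (nums : List Int) (out : Bool) : Prop := out = find_violation_alt nums
instance (nums : List Int) (out : Bool) : Decidable (Spec_find_violation nums out) := by unfold Spec_find_violation; infer_instance

-- ===== CLAIM =====
def Claim_equal_find_violation : Prop := ∀ (nums : List Int), Dom_find_violation nums → Pre_find_violation nums → Spec_find_violation nums (find_violation nums)

-- ===== LEMMAS AND PROOFS =====

/-- Number of strict descents when scanning `l` with previous element `left` (A's counter). -/
def descAux (left : Int) : List Int → Int
  | [] => 0
  | r :: rest => (if left > r then 1 else 0) + descAux r rest

/-- Descent count over a list of adjacent pairs. -/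
def descP : List (Int × Int) → Int
  | [] => 0
  | (a, b) :: t => (if a > b then 1 else 0) + descP t

theorem descP_nonneg (l : List (Int × Int)) : 0 ≤ descP l := by
  induction l with
  | nil => simp [descP]
  | cons p t ih => obtain ⟨a, b⟩ := p; simp only [descP]; split <;> omega

theorem descAux_eq_descP (t : List Int) (a : Int) :
    descAux a t = descP ((a :: t).zip t) := by
  induction t generalizing a with
  | nil => simp [descAux, descP]
  | cons b t' ih => simp only [descAux, List.zip_cons_cons, descP, ih b]

theorem sortedPairs_eq (t : List (Int × Int)) : sortedPairs t = decide (descP t = 0) := by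
  induction t with
  | nil => simp [sortedPairs, descP]
  | cons p t' ih =>
      obtain ⟨a, b⟩ := p
      have h := descP_nonneg t'
      by_cases hab : a > b
      · have h1 : ¬ a ≤ b := by omega
        have h2 : ¬ ((1 : Int) + descP t' = 0) := by omega
        simp [sortedPairs, descP, hab, h1, h2]
      · have h1 : a ≤ b := by omega
        simp [sortedPairs, descP, hab, h1, ih]

theorem scanB_eq (ps : List (Int × Int)) (f w : Int) :
    scanB f w ps = (decide (descP ps = 0) || (decide (descP ps = 1) && decide (w ≤ f))) := by
  induction ps with
  | nil => simp [scanB, descP]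
  | cons p t ih =>
      obtain ⟨a, b⟩ := p
      have h := descP_nonneg t
      by_cases hab : a > b
      · have h2 : ¬ ((1 : Int) + descP t = 0) := by omega
        have h3 : ((1 : Int) + descP t = 1) ↔ descP t = 0 := by omega
        simp [scanB, descP, hab, sortedPairs_eq, h2, h3]
      · simp [scanB, descP, hab, ih]

/-- A's loop state: the violation counter accumulates `descAux`. -/
theorem afold_fst (l : List Int) (left v : Int) :
    (l.foldl (fun (s : Int × Int) r =>
        ((if s.2 > r then s.1 + 1 else s.1), r)) (v, left)).1 = v + descAux left l := by
  induction l generalizing left v with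
  | nil => simp [descAux]
  | cons r rest ih =>
      simp only [List.foldl_cons, descAux, ih]
      split <;> omega

-- ===== VERDICT =====
theorem find_violation_spec : Claim_equal_find_violation := by
  intro nums _ hpre
  unfold Spec_find_violation find_violation find_violation_alt
  obtain ⟨x, rest, rfl⟩ : ∃ a l, nums = a :: l := by
    cases nums with
    | nil => exact absurd rfl hpre
    | cons a l => exact ⟨a, l, rfl⟩
  simp only []
  rw [PySem.List.foldl_pyRange_pyGetD' (x :: rest) 0
      (fun (s : Int × Int) r => ((if s.2 > r then s.1 + 1 else s.1), r))
      ((0 : Int), PySem.List.pyGetD (x :: rest) 0 0) (by norm_num)]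
  simp only [Int.toNat_one, List.drop_one, List.tail_cons]
  rw [afold_fst]
  rw [scanB_eq, ← descAux_eq_descP]
  have h0 : PySem.List.pyGetD (x :: rest) 0 0 = x := PySem.List.pyGetD_zero_cons x rest 0
  rw [h0]
  set L := PySem.List.pyGetD (x :: rest) (-1) 0
  set d := descAux x rest with hd
  have hnn : 0 ≤ d := by
    rw [hd, descAux_eq_descP]; exact descP_nonneg _
  by_cases hL : L ≤ x <;> by_cases hd0 : d = 0 <;> by_cases hd1 : d = 1 <;>
    simp_all
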